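-- pv_equiv track=rewrite | github.com/981377660LMT/algorithm-study | 5_map/邻接表/Minimum Adjacent Elements-有序数组绝对差最小.py | solve
-- ===== SOURCE A (Python) =====
-- from collections import defaultdict
--
-- def solve(nums):
--     indexMap = defaultdict(list)
--     for i, num in enumerate(nums):
--         indexMap[num].append(i)
--
--     res = int(1e20)
--
--     # 相等元素
--     for indexes in indexMap.values():
--         for pre, cur in zip(indexes, indexes[1:]):
--             res = min(res, abs(pre - cur))
--
--     if res == 1:
--         return 1
--
--     # 不等元素
--     keys = sorted(indexMap)
--     for i in range(len(keys) - 1):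
--         nums1, nums2 = indexMap[keys[i]], indexMap[keys[i + 1]]
--         i, j = 0, 0
--         while i < len(nums1) and j < len(nums2):
--             res = min(res, abs(nums1[i] - nums2[j]))
--             if nums1[i] < nums2[j]:
--                 i += 1
--             else:
--                 j += 1
--
--     return res
-- ===== SOURCE B (Python) =====
-- def solve(nums):
--     keys = sorted(set(nums))
--     rank = {v: r for r, v in enumerate(keys)}
--     ranks = [rank[v] for v in nums]
--     res = int(1e20)
--     last = [None] * len(keys)
--     for j, r in enumerate(ranks):
--         for rr in (r - 1, r, r + 1):
--             if 0 <= rr < len(keys) and last[rr] is not None: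
--                 res = min(res, j - last[rr])
--         last[r] = j
--     return res
-- ===== Notes on version B (the rewrite author's own statement) =====
-- stated objective: alternative
-- what changed: Replaces A's per-value index map, equal-element zip pass, early return and sorted-key two-pointer merges by a single left-to-right sweep: values are dense-ranked via a dict built from sorted(set(nums)), and a last-seen array per rank yields min(j - last[r]) over the ranks adjacent to the current element's rank.
import Mathlib
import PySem

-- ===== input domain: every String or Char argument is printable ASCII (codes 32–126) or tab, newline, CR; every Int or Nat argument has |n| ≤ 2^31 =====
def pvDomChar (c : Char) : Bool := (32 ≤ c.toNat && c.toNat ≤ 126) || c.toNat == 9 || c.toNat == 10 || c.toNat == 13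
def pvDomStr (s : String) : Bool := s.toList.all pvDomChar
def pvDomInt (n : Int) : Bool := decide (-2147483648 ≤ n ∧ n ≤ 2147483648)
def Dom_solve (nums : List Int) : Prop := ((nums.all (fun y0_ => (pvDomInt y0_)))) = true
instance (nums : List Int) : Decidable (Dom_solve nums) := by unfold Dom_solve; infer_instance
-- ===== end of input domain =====

-- B replaces A's per-value index map, equal-element pass and sorted-key two-pointer merges by one
-- left-to-right sweep with dense ranks (index in sorted(set(nums))) and a per-rank last-seen array;
-- same return value on every input.

-- ===== PORT A =====
-- the 'while i < len(nums1) and j < len(nums2)' two-pointer loop of A; the Nat argument is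
-- an exact fuel bound (total number of remaining elements) making the recursion structural
def tpGo : Nat → List Int → List Int → Int → Int
  | n + 1, x :: xs, y :: ys, res =>
    if x < y then tpGo n xs (y :: ys) (min res |x - y|)
    else tpGo n (x :: xs) ys (min res |x - y|)
  | _, _, _, res => res

def tpLoop (xs ys : List Int) (res : Int) : Int := tpGo (xs.length + ys.length) xs ys res

def solve (nums : List Int) : Int :=
  let indexMap : PySem.Dict Int (List Int) :=
    (PySem.List.enumerate nums).foldl
      (fun d p => d.modify p.2 [] (fun l => l ++ [p.1])) PySem.Dict.empty
  let res0 : Int := 10 ^ 20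
  let res1 :=
    indexMap.values.foldl
      (fun res idxs =>
        (idxs.zip (PySem.List.slice idxs (some 1) none)).foldl
          (fun r pc => min r |pc.1 - pc.2|) res)
      res0
  if res1 = 1 then 1
  else
    let keys := PySem.List.sorted indexMap.keys (fun x => x) false
    (PySem.List.pyRange 0 (PySem.List.len keys - 1)).foldl
      (fun res t =>
        tpLoop (indexMap.getD (PySem.List.pyGetD keys t 0) [])
               (indexMap.getD (PySem.List.pyGetD keys (t + 1) 0) []) res)
      res1

-- ===== PORT B =====
def solve_alt (nums : List Int) : Int :=
  let keys := PySem.List.sorted (PySem.Set.ofList nums) (fun x => x) false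
  let rankD : PySem.Dict Int Int :=
    (PySem.List.enumerate keys).foldl (fun d p => d.insert p.2 p.1) PySem.Dict.empty
  let ranks : List Int := nums.map (fun v => rankD.getD v 0)
  let st :=
    (PySem.List.enumerate ranks).foldl
      (fun (st : Int × List (Option Int)) jr =>
        (([jr.2 - 1, jr.2, jr.2 + 1] : List Int).foldl
            (fun res rr =>
              if 0 ≤ rr ∧ rr < PySem.List.len keys then
                match PySem.List.pyGetD st.2 rr none with
                | some m => min res (jr.1 - m)
                | none => res
              else res)
            st.1,
         PySem.List.pySetD st.2 jr.2 (some jr.1)))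
      ((10 : Int) ^ 20, List.replicate keys.length (none : Option Int))
  st.1

-- ===== PRECONDITION & SPEC =====
def Spec_solve (nums : List Int) (out : Int) : Prop := out = solve_alt nums
instance (nums : List Int) (out : Int) : Decidable (Spec_solve nums out) := by unfold Spec_solve; infer_instance

-- ===== CLAIM (what is proved, stated in full; the proofs are below) =====
def Claim_equal_solve : Prop := ∀ (nums : List Int), Dom_solve nums → Spec_solve nums (solve nums)

-- ===== LEMMAS AND PROOFS =====

-- the sorted list of distinct values
def srt (nums : List Int) : List Int := PySem.List.sorted (PySem.Set.ofList nums) (fun x => x) false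
-- dense rank of a value
def rk (nums : List Int) (v : Int) : Int := ((PySem.List.index? (srt nums) v).getD 0 : Int)
-- the (increasing) list of indices of value v, as Ints
def occ (nums : List Int) (v : Int) : List Int :=
  (PySem.List.pyRange 0 (PySem.List.len nums)).filter (fun j => PySem.List.pyGetD nums j 0 == v)
-- consecutive-gap candidates of one value group
def gaps (l : List Int) : List Int := (l.zip l.tail).map (fun p => |p.1 - p.2|)
-- all cross-pair candidates of two groups
def crossL (xs ys : List Int) : List Int := xs.flatMap (fun a => ys.map (fun b => |a - b|))
-- A's candidate lists
def C1 (nums : List Int) : List Int := (PySem.Set.ofList nums).flatMap (fun v => gaps (occ nums v))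
def C2 (nums : List Int) : List Int :=
  (PySem.List.pyRange 0 (PySem.List.len (srt nums) - 1)).flatMap
    (fun t => crossL (occ nums (PySem.List.pyGetD (srt nums) t 0))
                     (occ nums (PySem.List.pyGetD (srt nums) (t + 1) 0)))
-- B's candidate list
def Bc (nums : List Int) : List Int :=
  (PySem.List.pyRange 0 (PySem.List.len nums)).flatMap
    (fun j => ((PySem.List.pyRange 0 j).filter
        (fun i => decide (|PySem.List.pyGetD (nums.map (rk nums)) i 0
                         - PySem.List.pyGetD (nums.map (rk nums)) j 0| ≤ 1))).map
      (fun i => j - i))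

-- generic min-fold facts
lemma foldl_foldl_min {α : Type} (L : List α) (g : α → List Int) (init : Int) :
    L.foldl (fun r x => (g x).foldl min r) init = (L.flatMap g).foldl min init := by
  induction L generalizing init with
  | nil => rfl
  | cons x L ih => simp [List.flatMap_cons, List.foldl_append, ih]

lemma foldl_min_eq_of_dom (init : Int) (L1 L2 : List Int)
    (h1 : ∀ c ∈ L1, ∃ c' ∈ L2, c' ≤ c) (h2 : ∀ c ∈ L2, ∃ c' ∈ L1, c' ≤ c) :
    L1.foldl min init = L2.foldl min init := by
  apply le_antisymm
  · rcases PySem.List.foldl_min_mem L2 init with h | h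
    · rw [h]; exact (PySem.List.foldl_min_le L1 init).1
    · rcases h2 _ h with ⟨c', hc', hle⟩
      exact le_trans ((PySem.List.foldl_min_le L1 init).2 _ hc') hle
  · rcases PySem.List.foldl_min_mem L1 init with h | h
    · rw [h]; exact (PySem.List.foldl_min_le L2 init).1
    · rcases h1 _ h with ⟨c', hc', hle⟩
      exact le_trans ((PySem.List.foldl_min_le L2 init).2 _ hc') hle

lemma foldl_min_of_all_ge (L : List Int) (init : Int) (h : ∀ c ∈ L, init ≤ c) :
    L.foldl min init = init := by
  rcases PySem.List.foldl_min_mem L init with h' | h'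
  · exact h'
  · exact le_antisymm (PySem.List.foldl_min_le L init).1 (h _ h')

lemma mem_zip_tail_iff (l : List Int) (pr : Int × Int) :
    pr ∈ l.zip l.tail ↔ ∃ p : Nat, ∃ _ : p + 1 < l.length, pr = (l[p], l[p + 1]) := by
  rw [List.mem_iff_getElem]
  constructor
  · rintro ⟨i, hi, rfl⟩
    have hl : i + 1 < l.length := by
      simp [List.length_zip, List.length_tail] at hi; omega
    exact ⟨i, hl, by simp [List.getElem_zip, List.getElem_tail]⟩
  · rintro ⟨p, hp, rfl⟩
    refine ⟨p, by simp [List.length_zip, List.length_tail]; omega, ?_⟩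
    simp [List.getElem_zip, List.getElem_tail]

lemma mem_occ_iff (nums : List Int) (v x : Int) :
    x ∈ occ nums v ↔ ∃ p : Nat, ∃ _ : p < nums.length, x = (p : Int) ∧ nums[p] = v := by
  unfold occ
  simp only [List.mem_filter, PySem.List.mem_pyRange_one, PySem.List.len_eq, beq_iff_eq]
  constructor
  · rintro ⟨⟨h0, hn⟩, hv⟩
    refine ⟨x.toNat, by omega, by omega, ?_⟩
    rw [PySem.List.pyGetD_eq_getElem nums 0 h0 (by omega)] at hv
    exact hv
  · rintro ⟨p, hp, rfl, hv⟩
    refine ⟨⟨by positivity, by exact_mod_cast hp⟩, ?_⟩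
    rw [PySem.List.pyGetD_eq_getElem nums 0 (by positivity) (by exact_mod_cast hp)]
    simpa using hv

lemma occ_pairwise (nums : List Int) (v : Int) : (occ nums v).Pairwise (· < ·) := by
  unfold occ
  exact List.Pairwise.sublist List.filter_sublist (PySem.List.pairwise_lt_pyRange_one 0 _)

lemma srt_pairwise (nums : List Int) : (srt nums).Pairwise (· < ·) :=
  PySem.List.sorted_ofList_pairwise_lt nums

lemma mem_srt_iff (nums : List Int) (v : Int) : v ∈ srt nums ↔ v ∈ nums := by
  simp [srt, PySem.List.mem_sorted, PySem.Set.mem_ofList]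

lemma rk_getElem (nums : List Int) (p : Nat) (hp : p < (srt nums).length) :
    rk nums (srt nums)[p] = (p : Int) := by
  have hmem : (srt nums)[p] ∈ srt nums := List.getElem_mem hp
  have hsome : (PySem.List.index? (srt nums) (srt nums)[p]).isSome := by
    rw [PySem.List.index?_isSome_iff]; exact hmem
  obtain ⟨k, hk⟩ := Option.isSome_iff_exists.mp hsome
  obtain ⟨hklt, hkeq, _⟩ := PySem.List.getElem_of_index?_eq_some hk
  have hnd : (srt nums).Nodup := (srt_pairwise nums).imp ne_of_lt
  have hkp : (srt nums)[k] = (srt nums)[p] := hkeq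
  have : k = p := (List.Nodup.getElem_inj_iff hnd).mp hkp
  rw [rk, hk, this]; rfl

lemma mem_crossL (xs ys : List Int) (c : Int) :
    c ∈ crossL xs ys ↔ ∃ a ∈ xs, ∃ b ∈ ys, c = |a - b| := by
  simp [crossL, List.mem_flatMap, List.mem_map, eq_comm]

lemma tpGo_le_init : ∀ (n : Nat) (xs ys : List Int) (r : Int), tpGo n xs ys r ≤ r := by
  intro n
  induction n with
  | zero => intro xs ys r; simp [tpGo]
  | succ n ih =>
    intro xs ys r
    match xs, ys with
    | [], _ => simp [tpGo]
    | _ :: _, [] => simp [tpGo]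
    | x :: xs, y :: ys =>
      simp only [tpGo]
      split
      · exact le_trans (ih _ _ _) (min_le_left _ _)
      · exact le_trans (ih _ _ _) (min_le_left _ _)

lemma tpGo_mem : ∀ (n : Nat) (xs ys : List Int) (r : Int),
    tpGo n xs ys r = r ∨ ∃ a ∈ xs, ∃ b ∈ ys, tpGo n xs ys r = |a - b| := by
  intro n
  induction n with
  | zero => intro xs ys r; left; simp [tpGo]
  | succ n ih =>
    intro xs ys r
    match xs, ys with
    | [], _ => left; simp [tpGo]
    | _ :: _, [] => left; simp [tpGo]
    | x :: xs, y :: ys =>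
      simp only [tpGo]
      split
      · rcases ih xs (y :: ys) (min r |x - y|) with h | h
        · rcases le_total r |x - y| with hm | hm
          · left; rw [h, min_eq_left hm]
          · right; exact ⟨x, by simp, y, by simp, by rw [h, min_eq_right hm]⟩
        · rcases h with ⟨a, ha, b, hb, he⟩
          exact Or.inr ⟨a, List.mem_cons_of_mem _ ha, b, hb, he⟩
      · rcases ih (x :: xs) ys (min r |x - y|) with h | h
        · rcases le_total r |x - y| with hm | hm
          · left; rw [h, min_eq_left hm]
          · right; exact ⟨x, by simp, y, by simp, by rw [h, min_eq_right hm]⟩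
        · rcases h with ⟨a, ha, b, hb, he⟩
          exact Or.inr ⟨a, ha, b, List.mem_cons_of_mem _ hb, he⟩

lemma tpGo_le_pair : ∀ (n : Nat) (xs ys : List Int) (r : Int),
    xs.length + ys.length ≤ n → xs.Pairwise (· < ·) → ys.Pairwise (· < ·) →
    ∀ a ∈ xs, ∀ b ∈ ys, tpGo n xs ys r ≤ |a - b| := by
  intro n
  induction n with
  | zero => intro xs ys r hn _ _ a ha b hb; simp at hn; rcases xs with _|_ <;> simp_all
  | succ n ih =>
    intro xs ys r hn hx hy a ha b hb
    match xs, ys with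
    | [], _ => simp at ha
    | _ :: _, [] => simp at hb
    | x :: xs, y :: ys =>
      simp only [tpGo]
      rcases List.pairwise_cons.mp hx with ⟨hxall, hx'⟩
      rcases List.pairwise_cons.mp hy with ⟨hyall, hy'⟩
      split
      · rename_i hxy
        rcases List.mem_cons.mp ha with rfl | ha'
        · have hyb : y ≤ b := by
            rcases List.mem_cons.mp hb with rfl | hb' ; · rfl
            · exact le_of_lt (hyall b hb')
          have h1 : |a - y| ≤ |a - b| := by
            rw [abs_sub_comm a y, abs_sub_comm a b]
            rw [abs_of_pos (by omega), abs_of_pos (by omega)]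
            omega
          exact le_trans (le_trans (tpGo_le_init _ _ _ _) (min_le_right _ _)) h1
        · exact ih xs (y :: ys) _ (by simp at hn ⊢; omega) hx' hy a ha' b hb
      · rename_i hxy
        push Not at hxy
        rcases List.mem_cons.mp hb with rfl | hb'
        · have hxa : x ≤ a := by
            rcases List.mem_cons.mp ha with rfl | ha' ; · rfl
            · exact le_of_lt (hxall a ha')
          have h1 : |x - b| ≤ |a - b| := by
            rcases List.mem_cons.mp ha with rfl | ha'
            · rfl
            · have : b ≤ x := hxy
              have : x < a := hxall a ha'
              rw [abs_of_nonneg (by omega), abs_of_nonneg (by omega)]; omega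
          exact le_trans (le_trans (tpGo_le_init _ _ _ _) (min_le_right _ _)) h1
        · exact ih (x :: xs) ys _ (by simp at hn ⊢; omega) hx hy' a ha b hb'

lemma rk_of_mem (nums : List Int) (v : Int) (hv : v ∈ nums) :
    ∃ p : Nat, ∃ _ : p < (srt nums).length, (srt nums)[p] = v ∧ rk nums v = (p : Int) := by
  have : v ∈ srt nums := (mem_srt_iff nums v).mpr hv
  rcases List.mem_iff_getElem.mp this with ⟨p, hp, he⟩
  exact ⟨p, hp, he, by rw [← he]; exact rk_getElem nums p hp⟩

lemma mem_Bc_iff (nums : List Int) (c : Int) :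
    c ∈ Bc nums ↔ ∃ p q : Nat, ∃ hp : p < nums.length, ∃ hq : q < nums.length, p < q ∧
      |rk nums nums[p] - rk nums nums[q]| ≤ 1 ∧ c = (q : Int) - (p : Int) := by
  unfold Bc
  simp only [List.mem_flatMap, List.mem_map, List.mem_filter, PySem.List.mem_pyRange_one,
    PySem.List.len_eq, decide_eq_true_eq]
  constructor
  · rintro ⟨j, ⟨hj0, hjn⟩, i, ⟨⟨hi0, hij⟩, hcond⟩, rfl⟩
    have hin : i < (nums.length : Int) := lt_trans hij hjn
    rw [PySem.List.pyGetD_eq_getElem _ _ hi0 (by simpa using hin),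
        PySem.List.pyGetD_eq_getElem _ _ (le_trans hi0 (le_of_lt hij)) (by simpa using hjn),
        List.getElem_map, List.getElem_map] at hcond
    refine ⟨i.toNat, j.toNat, by omega, by omega, by omega, hcond, by omega⟩
  · rintro ⟨p, q, hp, hq, hpq, hcond, rfl⟩
    refine ⟨(q : Int), ⟨by positivity, by exact_mod_cast hq⟩,
            (p : Int), ⟨⟨by positivity, by exact_mod_cast hpq⟩, ?_⟩, rfl⟩
    rw [PySem.List.pyGetD_eq_getElem _ _ (by positivity)
          (by simp only [List.length_map]; exact_mod_cast hp),
        PySem.List.pyGetD_eq_getElem _ _ (by positivity)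
          (by simp only [List.length_map]; exact_mod_cast hq),
        List.getElem_map, List.getElem_map]
    simpa using hcond

lemma mem_C2_iff (nums : List Int) (c : Int) :
    c ∈ C2 nums ↔ ∃ t p q : Nat, ∃ ht : t + 1 < (srt nums).length,
      ∃ hp : p < nums.length, ∃ hq : q < nums.length,
      nums[p] = (srt nums)[t] ∧ nums[q] = (srt nums)[t + 1] ∧ c = |(p : Int) - (q : Int)| := by
  unfold C2
  simp only [List.mem_flatMap, PySem.List.mem_pyRange_one, PySem.List.len_eq]
  constructor
  · rintro ⟨t, ⟨ht0, htl⟩, hc⟩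
    rcases (mem_crossL _ _ _).mp hc with ⟨a, ha, b, hb, rfl⟩
    have htn : t.toNat + 1 < (srt nums).length := by omega
    rw [PySem.List.pyGetD_eq_getElem _ _ ht0 (by omega)] at ha
    rw [PySem.List.pyGetD_eq_getElem _ _ (by omega) (by omega)] at hb
    have h1 : (t + 1).toNat = t.toNat + 1 := by omega
    simp only [h1] at hb
    rcases (mem_occ_iff _ _ _).mp ha with ⟨p, hp, rfl, hvp⟩
    rcases (mem_occ_iff _ _ _).mp hb with ⟨q, hq, rfl, hvq⟩
    exact ⟨t.toNat, p, q, htn, hp, hq, hvp, hvq, rfl⟩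
  · rintro ⟨t, p, q, ht, hp, hq, hvp, hvq, rfl⟩
    refine ⟨(t : Int), ⟨by positivity, by omega⟩, ?_⟩
    apply (mem_crossL _ _ _).mpr
    rw [PySem.List.pyGetD_eq_getElem _ _ (by positivity) (by omega),
        PySem.List.pyGetD_eq_getElem _ _ (by positivity) (by omega)]
    simp only [show ((t : Int) + 1).toNat = t + 1 from by omega,
      show ((t : Int)).toNat = t from by omega]
    exact ⟨(p : Int), (mem_occ_iff _ _ _).mpr ⟨p, hp, rfl, hvp⟩,
           (q : Int), (mem_occ_iff _ _ _).mpr ⟨q, hq, rfl, hvq⟩, rfl⟩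

lemma mem_C1_elim (nums : List Int) (c : Int) (hc : c ∈ C1 nums) :
    ∃ p q : Nat, ∃ hp : p < nums.length, ∃ hq : q < nums.length, p < q ∧
      nums[p] = nums[q] ∧ c = (q : Int) - (p : Int) := by
  unfold C1 at hc
  rcases List.mem_flatMap.mp hc with ⟨v, _, hg⟩
  rcases List.mem_map.mp hg with ⟨pr, hpr, rfl⟩
  rcases (mem_zip_tail_iff _ _).mp hpr with ⟨s, hs, rfl⟩
  have hmono := List.pairwise_iff_getElem.mp (occ_pairwise nums v) s (s + 1) (by omega) hs
    (by omega)
  rcases (mem_occ_iff _ _ _).mp (List.getElem_mem (by omega : s < (occ nums v).length)) with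
    ⟨p, hp, he1, hv1⟩
  rcases (mem_occ_iff _ _ _).mp (List.getElem_mem hs) with ⟨q, hq, he2, hv2⟩
  refine ⟨p, q, hp, hq, ?_, by rw [hv1, hv2], ?_⟩
  · rw [he1, he2] at hmono; exact_mod_cast hmono
  · rw [he1, he2] at hmono ⊢
    rw [abs_of_nonpos (by omega)]
    ring

lemma gap_of_two_mem (l : List Int) (hpw : l.Pairwise (· < ·)) (a b : Int)
    (ha : a ∈ l) (hb : b ∈ l) (hab : a < b) :
    ∃ pr ∈ l.zip l.tail, |pr.1 - pr.2| ≤ b - a := by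
  rcases List.mem_iff_getElem.mp ha with ⟨s, hsl, hes⟩
  rcases List.mem_iff_getElem.mp hb with ⟨t, htl, het⟩
  have hmono : ∀ i j (hi : i < l.length) (hj : j < l.length), i < j → l[i] < l[j] :=
    fun i j hi hj hij => List.pairwise_iff_getElem.mp hpw i j hi hj hij
  have hle : ∀ i j (hi : i < l.length) (hj : j < l.length), i ≤ j → l[i] ≤ l[j] := by
    intro i j hi hj hij
    rcases Nat.eq_or_lt_of_le hij with h | h
    · subst h; exact le_refl _
    · exact le_of_lt (hmono i j hi hj h)
  have hst : s < t := by
    by_contra hcon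
    have := hle t s htl hsl (by omega)
    rw [hes, het] at this
    omega
  refine ⟨(l[s]'(by omega), l[s+1]'(by omega)), (mem_zip_tail_iff _ _).mpr ⟨s, by omega, rfl⟩, ?_⟩
  have h1 : l[s]'(by omega) < l[s+1]'(by omega) := hmono s (s+1) (by omega) (by omega) (by omega)
  have h2 : l[s+1]'(by omega) ≤ l[t]'htl := hle (s+1) t (by omega) htl (by omega)
  simp only
  rw [abs_of_nonpos (by omega)]
  omega

lemma C1_intro (nums : List Int) (p q : Nat) (hp : p < nums.length) (hq : q < nums.length)
    (hpq : p < q) (hv : nums[p] = nums[q]) :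
    ∃ c' ∈ C1 nums, c' ≤ (q : Int) - (p : Int) := by
  have hmem1 : ((p : Int)) ∈ occ nums nums[p] := (mem_occ_iff _ _ _).mpr ⟨p, hp, rfl, rfl⟩
  have hmem2 : ((q : Int)) ∈ occ nums nums[p] := (mem_occ_iff _ _ _).mpr ⟨q, hq, rfl, hv.symm⟩
  rcases gap_of_two_mem (occ nums nums[p]) (occ_pairwise nums nums[p]) _ _ hmem1 hmem2
    (by exact_mod_cast hpq) with ⟨pr, hpr, hle⟩
  refine ⟨|pr.1 - pr.2|, ?_, hle⟩
  unfold C1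
  apply List.mem_flatMap.mpr
  refine ⟨nums[p], ?_, List.mem_map.mpr ⟨pr, hpr, rfl⟩⟩
  rw [PySem.Set.mem_ofList]; exact List.getElem_mem hp

lemma dom_A_B (nums : List Int) : ∀ c ∈ C1 nums ++ C2 nums, ∃ c' ∈ Bc nums, c' ≤ c := by
  intro c hc
  rcases List.mem_append.mp hc with hc | hc
  · rcases mem_C1_elim nums c hc with ⟨p, q, hp, hq, hpq, hv, rfl⟩
    refine ⟨(q : Int) - (p : Int), ?_, le_rfl⟩
    apply (mem_Bc_iff _ _).mpr
    exact ⟨p, q, hp, hq, hpq, by rw [hv]; simp, rfl⟩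
  · rcases (mem_C2_iff nums c).mp hc with ⟨t, p, q, ht, hp, hq, hvp, hvq, rfl⟩
    have hne : nums[p] ≠ nums[q] := by
      rw [hvp, hvq]
      exact ne_of_lt (List.pairwise_iff_getElem.mp (srt_pairwise nums) t (t+1) (by omega) ht
        (by omega))
    have hpq : p ≠ q := fun h => hne (by cases h; rfl)
    have hrkp : rk nums nums[p] = (t : Int) := by rw [hvp]; exact rk_getElem nums t (by omega)
    have hrkq : rk nums nums[q] = (t : Int) + 1 := by
      rw [hvq]; exact_mod_cast rk_getElem nums (t+1) ht
    rcases Nat.lt_or_ge p q with h | h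
    · refine ⟨(q : Int) - (p : Int), ?_, by rw [abs_of_nonpos (by omega)]; omega⟩
      exact (mem_Bc_iff _ _).mpr ⟨p, q, hp, hq, h, by rw [hrkp, hrkq]; simp, rfl⟩
    · have h' : q < p := by omega
      refine ⟨(p : Int) - (q : Int), ?_, by rw [abs_of_nonneg (by omega)]⟩
      exact (mem_Bc_iff _ _).mpr ⟨q, p, hq, hp, h', by rw [hrkp, hrkq]; simp, rfl⟩

lemma dom_B_A (nums : List Int) : ∀ c ∈ Bc nums, ∃ c' ∈ C1 nums ++ C2 nums, c' ≤ c := by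
  intro c hc
  rcases (mem_Bc_iff nums c).mp hc with ⟨p, q, hp, hq, hpq, hcond, rfl⟩
  rcases rk_of_mem nums nums[p] (List.getElem_mem hp) with ⟨pu, hpu, hepu, hrku⟩
  rcases rk_of_mem nums nums[q] (List.getElem_mem hq) with ⟨pv, hpv, hepv, hrkv⟩
  rw [hrku, hrkv] at hcond
  have hcond' := abs_le.mp hcond
  have h3 : pu = pv ∨ pv = pu + 1 ∨ pu = pv + 1 := by omega
  rcases h3 with h | h | h
  · subst h
    have hv : nums[p] = nums[q] := by rw [← hepu, ← hepv]
    rcases C1_intro nums p q hp hq hpq hv with ⟨c', hc', hle⟩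
    exact ⟨c', List.mem_append.mpr (Or.inl hc'), hle⟩
  · subst h
    refine ⟨|(p : Int) - (q : Int)|, List.mem_append.mpr (Or.inr ?_),
      by rw [abs_of_nonpos (by omega)]; omega⟩
    exact (mem_C2_iff nums _).mpr ⟨pu, p, q, hpv, hp, hq, hepu.symm, hepv.symm, rfl⟩
  · subst h
    refine ⟨|(q : Int) - (p : Int)|, List.mem_append.mpr (Or.inr ?_),
      by rw [abs_of_nonneg (by omega)]⟩
    exact (mem_C2_iff nums _).mpr ⟨pv, q, p, hpu, hq, hp, hepv.symm, hepu.symm, rfl⟩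

lemma c2_ge_one (nums : List Int) : ∀ c ∈ C2 nums, (1 : Int) ≤ c := by
  intro c hc
  rcases (mem_C2_iff nums c).mp hc with ⟨t, p, q, ht, hp, hq, hvp, hvq, rfl⟩
  have hne : p ≠ q := by
    intro h
    have : nums[p] = nums[q] := by cases h; rfl
    rw [hvp, hvq] at this
    exact ne_of_lt (List.pairwise_iff_getElem.mp (srt_pairwise nums) t (t+1) (by omega) ht
      (by omega)) this
  rcases Nat.lt_or_ge p q with h | h
  · rw [abs_of_nonpos (by omega)]; omega
  · rw [abs_of_nonneg (by omega)]; omega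

lemma tpLoop_eq (xs ys : List Int) (r : Int)
    (hx : xs.Pairwise (· < ·)) (hy : ys.Pairwise (· < ·)) :
    tpLoop xs ys r = (crossL xs ys).foldl min r := by
  apply le_antisymm
  · rcases PySem.List.foldl_min_mem (crossL xs ys) r with h | h
    · rw [h]; exact tpGo_le_init _ _ _ _
    · rcases (mem_crossL _ _ _).mp h with ⟨a, ha, b, hb, he⟩
      rw [he]; exact tpGo_le_pair _ _ _ _ le_rfl hx hy a ha b hb
  · rcases tpGo_mem (xs.length + ys.length) xs ys r with h | ⟨a, ha, b, hb, he⟩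
    · rw [tpLoop, h]; exact (PySem.List.foldl_min_le _ _).1
    · rw [tpLoop, he]
      exact (PySem.List.foldl_min_le _ _).2 _ ((mem_crossL _ _ _).mpr ⟨a, ha, b, hb, rfl⟩)

-- the dict built by A, named
def dA (nums : List Int) : PySem.Dict Int (List Int) :=
  (PySem.List.enumerate nums).foldl
    (fun d p => d.modify p.2 [] (fun l => l ++ [p.1])) PySem.Dict.empty

lemma dA_getD (nums : List Int) (v : Int) : (dA nums).getD v [] = occ nums v := by
  have h : dA nums =
      ((PySem.List.enumerate nums).map (fun p : Int × Int => (p.2, p.1))).foldl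
        (fun (d : PySem.Dict Int (List Int)) q => d.modify q.1 [] (fun l => l ++ [q.2]))
        PySem.Dict.empty := by
    rw [List.foldl_map]; rfl
  rw [h, PySem.Dict.getD_foldl_modify_append]
  rw [PySem.List.enumerate_eq_map_pyRange nums 0, List.map_map, List.filter_map, List.map_map]
  unfold occ
  simp [Function.comp_def]

lemma dA_keys (nums : List Int) : (dA nums).keys = PySem.Set.ofList nums := by
  unfold dA
  rw [PySem.Dict.keys_foldl_modify_key (PySem.List.enumerate nums) (fun p => p.2) []
      (fun _ p => (fun l => l ++ [p.1])) PySem.Dict.empty]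
  rw [PySem.Dict.keys_empty, PySem.Set.update_nil_left]
  congr 1
  rw [PySem.List.enumerate_eq_map_pyRange nums 0, List.map_map]
  exact PySem.List.map_pyGetD_pyRange_zero nums 0

lemma dA_keys_nodup (nums : List Int) : (dA nums).keys.Nodup :=
  PySem.Dict.nodup_keys_foldl_modify_key _ _ _ _ _ PySem.Dict.nodup_keys_empty

lemma solve_eq_foldl (nums : List Int) :
    solve nums = (C1 nums ++ C2 nums).foldl min (10 ^ 20) := by
  have hvals : (dA nums).values = (PySem.Set.ofList nums).map (fun v => occ nums v) := by
    have : (dA nums).values = (dA nums).items.map (fun p => p.2) := rfl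
    rw [this, PySem.Dict.items_eq_map_keys (dA nums) (dA_keys_nodup nums) [], List.map_map,
      dA_keys]
    exact List.map_congr_left (fun v _ => dA_getD nums v)
  have hres1 : ∀ r0 : Int,
      (dA nums).values.foldl
        (fun res idxs =>
          (idxs.zip (PySem.List.slice idxs (some 1) none)).foldl
            (fun r pc => min r |pc.1 - pc.2|) res) r0
      = (C1 nums).foldl min r0 := by
    intro r0
    rw [hvals, List.foldl_map]
    rw [PySem.List.foldl_congr_mem _ _
      (fun res v => (gaps (occ nums v)).foldl min res) r0 ?_]
    · exact foldl_foldl_min _ _ r0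
    · intro acc v _
      simp only [gaps, List.foldl_map, PySem.List.slice_from_one]
  have hcross : ∀ r1 : Int,
      (PySem.List.pyRange 0 (PySem.List.len (srt nums) - 1)).foldl
        (fun res t =>
          tpLoop ((dA nums).getD (PySem.List.pyGetD (srt nums) t 0) [])
                 ((dA nums).getD (PySem.List.pyGetD (srt nums) (t + 1) 0) []) res) r1
      = (C2 nums).foldl min r1 := by
    intro r1
    rw [PySem.List.foldl_congr_mem _ _
      (fun res t => (crossL (occ nums (PySem.List.pyGetD (srt nums) t 0))
                            (occ nums (PySem.List.pyGetD (srt nums) (t + 1) 0))).foldl min res) r1 ?_]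
    · exact foldl_foldl_min _ _ r1
    · intro acc t _
      rw [dA_getD, dA_getD, tpLoop_eq _ _ _ (occ_pairwise nums _) (occ_pairwise nums _)]
  have hkeys : PySem.List.sorted (dA nums).keys (fun x => x) false = srt nums := by
    rw [dA_keys]; rfl
  show (if (dA nums).values.foldl
        (fun res idxs => (idxs.zip (PySem.List.slice idxs (some 1) none)).foldl
          (fun r pc => min r |pc.1 - pc.2|) res) ((10:Int) ^ 20) = 1
      then (1:Int)
      else (PySem.List.pyRange 0
          (PySem.List.len (PySem.List.sorted (dA nums).keys (fun x => x) false) - 1)).foldl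
        (fun res t =>
          tpLoop ((dA nums).getD
              (PySem.List.pyGetD (PySem.List.sorted (dA nums).keys (fun x => x) false) t 0) [])
            ((dA nums).getD
              (PySem.List.pyGetD (PySem.List.sorted (dA nums).keys (fun x => x) false) (t + 1) 0) [])
            res)
        ((dA nums).values.foldl
          (fun res idxs => (idxs.zip (PySem.List.slice idxs (some 1) none)).foldl
            (fun r pc => min r |pc.1 - pc.2|) res) ((10:Int) ^ 20)))
    = (C1 nums ++ C2 nums).foldl min (10 ^ 20)
  rw [hkeys, hres1, hcross, List.foldl_append]
  split_ifs with h
  · rw [h]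
    exact (foldl_min_of_all_ge _ _ (c2_ge_one nums)).symm
  · rfl

-- ===== B-side: the last-seen sweep =====

-- most recent index < j holding rank r
def lastOcc (nums : List Int) (r j : Int) : Option Int :=
  ((PySem.List.pyRange 0 j).filter
    (fun i => PySem.List.pyGetD (nums.map (rk nums)) i 0 == r)).getLast?

-- per-index candidate list of the sweep
def gS (nums : List Int) (j : Int) : List Int :=
  ([PySem.List.pyGetD (nums.map (rk nums)) j 0 - 1, PySem.List.pyGetD (nums.map (rk nums)) j 0,
    PySem.List.pyGetD (nums.map (rk nums)) j 0 + 1] : List Int).filterMap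
    (fun rr => if 0 ≤ rr ∧ rr < PySem.List.len (srt nums) then
        (lastOcc nums rr j).map (fun m => j - m) else none)

-- all sweep candidates
def Sc (nums : List Int) : List Int :=
  (PySem.List.pyRange 0 (PySem.List.len nums)).flatMap (gS nums)

-- the 'last' array after processing indices < j
def lastState (nums : List Int) (j : Int) : List (Option Int) :=
  (List.range (srt nums).length).map (fun (r : Nat) => lastOcc nums (r : Int) j)

lemma srt_nodup (nums : List Int) : (srt nums).Nodup :=
  (srt_pairwise nums).imp ne_of_lt

lemma ranksL_at (nums : List Int) (p : Nat) (hp : p < nums.length) :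
    PySem.List.pyGetD (nums.map (rk nums)) (p : Int) 0 = rk nums nums[p] := by
  rw [PySem.List.pyGetD_eq_getElem _ _ (by positivity)
      (by simp only [List.length_map]; exact_mod_cast hp), List.getElem_map]
  simp

lemma rk_bounds (nums : List Int) (v : Int) (hv : v ∈ nums) :
    0 ≤ rk nums v ∧ rk nums v < ((srt nums).length : Int) := by
  rcases rk_of_mem nums v hv with ⟨p, hp, _, hrk⟩
  rw [hrk]; constructor <;> [positivity; exact_mod_cast hp]

lemma rankD_getD (nums : List Int) (v : Int) (hv : v ∈ nums) :
    ((PySem.List.enumerate (srt nums)).foldl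
      (fun d p => d.insert p.2 p.1) PySem.Dict.empty).getD v 0 = rk nums v := by
  have hitems : ((PySem.List.enumerate (srt nums)).foldl
      (fun d p => d.insert p.2 p.1) PySem.Dict.empty).items
      = (PySem.List.enumerate (srt nums)).map (fun a => (a.2, a.1)) := by
    have := PySem.Dict.items_foldl_insert_fresh (PySem.List.enumerate (srt nums))
      (fun a => a.2) (fun a => a.1) (PySem.Dict.empty (κ := Int) (ν := Int))
      (fun a _ => PySem.Dict.contains_empty _)
      (by
        have : (PySem.List.enumerate (srt nums)).map (fun a => a.2) = srt nums := by
          rw [PySem.List.enumerate_eq_map_pyRange (srt nums) 0, List.map_map]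
          exact PySem.List.map_pyGetD_pyRange_zero (srt nums) 0
        rw [this]; exact srt_nodup nums)
    simpa using this
  have hkeysnd : ((PySem.List.enumerate (srt nums)).foldl
      (fun d p => d.insert p.2 p.1) PySem.Dict.empty).keys.Nodup := by
    have hk : ((PySem.List.enumerate (srt nums)).foldl
        (fun d p => d.insert p.2 p.1) PySem.Dict.empty).keys
        = ((PySem.List.enumerate (srt nums)).map (fun a => (a.2, a.1))).map (fun p => p.1) := by
      rw [← hitems]; rfl
    rw [hk, List.map_map]
    have : ((PySem.List.enumerate (srt nums)).map (fun a => (a.2, a.1))).map (fun p => p.1)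
        = srt nums := by
      rw [List.map_map, PySem.List.enumerate_eq_map_pyRange (srt nums) 0, List.map_map]
      exact PySem.List.map_pyGetD_pyRange_zero (srt nums) 0
    rw [List.map_map] at this
    rw [this]; exact srt_nodup nums
  rcases rk_of_mem nums v hv with ⟨p, hp, hev, hrk⟩
  have hmem : (v, (p : Int)) ∈ ((PySem.List.enumerate (srt nums)).foldl
      (fun d p => d.insert p.2 p.1) PySem.Dict.empty).items := by
    rw [hitems]
    apply List.mem_map.mpr
    refine ⟨((p : Int), v), ?_, rfl⟩
    rw [PySem.List.mem_enumerate_iff]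
    exact ⟨p, hp, by simp [hev]⟩
  rw [PySem.Dict.getD_of_mem_items _ hmem hkeysnd, hrk]

lemma foldl_singleton {α β : Type} (f : β → α → β) (i : β) (x : α) :
    List.foldl f i [x] = f i x := rfl

lemma foldl_match_min (h : Int → Option Int) (l : List Int) (res : Int) :
    l.foldl (fun res rr => match h rr with | some c => min res c | none => res) res
      = (l.filterMap h).foldl min res := by
  induction l generalizing res with
  | nil => rfl
  | cons x l ih =>
    cases hx : h x <;> simp [hx, ih]

lemma getLast?_max (l : List Int) (hpw : l.Pairwise (· < ·)) (m : Int)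
    (h : l.getLast? = some m) : ∀ y ∈ l, y ≤ m := by
  intro y hy
  rcases List.mem_iff_getElem.mp hy with ⟨s, hs, rfl⟩
  have hne : l ≠ [] := by rintro rfl; simp at h
  have hm : m = l.getLast hne := by
    rw [List.getLast?_eq_some_getLast hne] at h
    exact (Option.some_injective _ h).symm
  rw [hm, List.getLast_eq_getElem]
  rcases Nat.eq_or_lt_of_le (by omega : s ≤ l.length - 1) with he | hlt
  · subst he; exact le_refl _
  · exact le_of_lt (List.pairwise_iff_getElem.mp hpw s (l.length - 1) hs (by omega) hlt)

lemma lastOcc_filter_pairwise (nums : List Int) (r j : Int) :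
    ((PySem.List.pyRange 0 j).filter
      (fun i => PySem.List.pyGetD (nums.map (rk nums)) i 0 == r)).Pairwise (· < ·) :=
  List.Pairwise.sublist List.filter_sublist (PySem.List.pairwise_lt_pyRange_one 0 j)

lemma lastOcc_some (nums : List Int) (r j m : Int) (h : lastOcc nums r j = some m) :
    (0 ≤ m ∧ m < j ∧ PySem.List.pyGetD (nums.map (rk nums)) m 0 = r) ∧
      ∀ i, 0 ≤ i → i < j → PySem.List.pyGetD (nums.map (rk nums)) i 0 = r → i ≤ m := by
  unfold lastOcc at h
  have hmem := List.mem_of_getLast? h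
  have hmax := getLast?_max _ (lastOcc_filter_pairwise nums r j) m h
  rcases List.mem_filter.mp hmem with ⟨hrange, hcond⟩
  rcases PySem.List.mem_pyRange_one.mp hrange with ⟨h0, h1⟩
  refine ⟨⟨h0, h1, by simpa using hcond⟩, ?_⟩
  intro i hi0 hij hic
  exact hmax i (List.mem_filter.mpr ⟨PySem.List.mem_pyRange_one.mpr ⟨hi0, hij⟩, by simpa using hic⟩)

lemma lastOcc_exists (nums : List Int) (r j i : Int) (hi0 : 0 ≤ i) (hij : i < j)
    (hic : PySem.List.pyGetD (nums.map (rk nums)) i 0 = r) :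
    ∃ m, lastOcc nums r j = some m ∧ i ≤ m := by
  have hmem : i ∈ (PySem.List.pyRange 0 j).filter
      (fun i => PySem.List.pyGetD (nums.map (rk nums)) i 0 == r) :=
    List.mem_filter.mpr ⟨PySem.List.mem_pyRange_one.mpr ⟨hi0, hij⟩, by simpa using hic⟩
  have hne : ((PySem.List.pyRange 0 j).filter
      (fun i => PySem.List.pyGetD (nums.map (rk nums)) i 0 == r)) ≠ [] :=
    List.ne_nil_of_mem hmem
  rcases Option.isSome_iff_exists.mp (by
    rw [List.getLast?_isSome]; exact hne) with ⟨m, hm⟩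
  exact ⟨m, hm, getLast?_max _ (lastOcc_filter_pairwise nums r j) m hm i hmem⟩

lemma lastOcc_zero (nums : List Int) (r : Int) : lastOcc nums r 0 = none := by
  unfold lastOcc
  rw [PySem.List.pyRange_one_eq_nil le_rfl]
  rfl

lemma lastOcc_succ (nums : List Int) (r : Int) (m : Nat) :
    lastOcc nums r ((m : Int) + 1)
      = if PySem.List.pyGetD (nums.map (rk nums)) (m : Int) 0 = r then some (m : Int)
        else lastOcc nums r (m : Int) := by
  unfold lastOcc
  rw [PySem.List.pyRange_one_succ_right (by positivity), List.filter_append]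
  by_cases hc : PySem.List.pyGetD (nums.map (rk nums)) (m : Int) 0 = r
  · have hc' : (PySem.List.pyGetD (nums.map (rk nums)) (m : Int) 0 == r) = true := by
      simpa using hc
    simp only [List.filter_cons, List.filter_nil, hc', if_true, List.getLast?_concat]
    rw [if_pos hc]
  · have hc' : (PySem.List.pyGetD (nums.map (rk nums)) (m : Int) 0 == r) = false := by
      simpa using hc
    simp only [List.filter_cons, List.filter_nil, hc', Bool.false_eq_true, if_false,
      List.append_nil]
    rw [if_neg hc]

lemma lastState_zero (nums : List Int) :
    List.replicate (srt nums).length (none : Option Int) = lastState nums 0 := by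
  apply List.ext_getElem
  · simp [lastState]
  · intro i h1 h2
    simp [lastState, lastOcc_zero]

lemma lastState_get (nums : List Int) (j rr : Int) (h0 : 0 ≤ rr)
    (h1 : rr < ((srt nums).length : Int)) :
    PySem.List.pyGetD (lastState nums j) rr none = lastOcc nums rr j := by
  rw [PySem.List.pyGetD_eq_getElem _ _ h0 (by simp [lastState]; omega)]
  simp only [lastState, List.getElem_map, List.getElem_range]
  congr 1
  omega

lemma lastState_set (nums : List Int) (m : Nat) (hm : m < nums.length) :
    PySem.List.pySetD (lastState nums (m : Int))
      (PySem.List.pyGetD (nums.map (rk nums)) (m : Int) 0) (some (m : Int))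
      = lastState nums ((m : Int) + 1) := by
  have hR := ranksL_at nums m hm
  have hb := rk_bounds nums nums[m] (List.getElem_mem hm)
  rw [PySem.List.pySetD_of_nonneg _ _ (by rw [hR]; exact hb.1)]
  apply List.ext_getElem
  · simp [lastState]
  · intro r h1 h2
    have hrK : r < (srt nums).length := by simpa [lastState] using h2
    rw [List.getElem_set]
    simp only [lastState, List.getElem_map, List.getElem_range]
    rw [lastOcc_succ]
    by_cases hc : (PySem.List.pyGetD (nums.map (rk nums)) (m : Int) 0).toNat = r
    · rw [if_pos hc, if_pos (by rw [hR] at hc ⊢; omega :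
        PySem.List.pyGetD (nums.map (rk nums)) (m : Int) 0 = (r : Int))]
    · rw [if_neg hc, if_neg]
      rw [hR] at hc ⊢
      intro hcon
      apply hc
      omega

lemma sweep (nums : List Int) (m : Nat) (hm : m ≤ nums.length) :
    (PySem.List.pyRange 0 (m : Int)).foldl
      (fun (st : Int × List (Option Int)) j =>
        (([PySem.List.pyGetD (nums.map (rk nums)) j 0 - 1,
           PySem.List.pyGetD (nums.map (rk nums)) j 0,
           PySem.List.pyGetD (nums.map (rk nums)) j 0 + 1] : List Int).foldl
            (fun res rr =>
              if 0 ≤ rr ∧ rr < PySem.List.len (srt nums) then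
                match PySem.List.pyGetD st.2 rr none with
                | some mm => min res (j - mm)
                | none => res
              else res)
            st.1,
         PySem.List.pySetD st.2 (PySem.List.pyGetD (nums.map (rk nums)) j 0) (some j)))
      ((10 : Int) ^ 20, lastState nums 0)
    = (((PySem.List.pyRange 0 (m : Int)).flatMap (gS nums)).foldl min ((10 : Int) ^ 20),
       lastState nums (m : Int)) := by
  induction m with
  | zero =>
    rw [show ((0 : Nat) : Int) = 0 from rfl, PySem.List.pyRange_one_eq_nil le_rfl]
    rfl
  | succ m ih =>
    have hcast : ((m + 1 : Nat) : Int) = (m : Int) + 1 := by push_cast; ring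
    rw [hcast, PySem.List.pyRange_one_succ_right (by positivity), List.foldl_append,
      ih (by omega), List.flatMap_append, List.foldl_append]
    have hstep : ∀ res : Int,
        (([PySem.List.pyGetD (nums.map (rk nums)) (m : Int) 0 - 1,
           PySem.List.pyGetD (nums.map (rk nums)) (m : Int) 0,
           PySem.List.pyGetD (nums.map (rk nums)) (m : Int) 0 + 1] : List Int).foldl
            (fun res rr =>
              if 0 ≤ rr ∧ rr < PySem.List.len (srt nums) then
                match PySem.List.pyGetD (lastState nums (m : Int)) rr none with
                | some mm => min res ((m : Int) - mm)
                | none => res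
              else res)
            res)
          = (gS nums (m : Int)).foldl min res := by
      intro res
      unfold gS
      rw [← foldl_match_min]
      apply PySem.List.foldl_congr_mem
      intro acc rr _
      by_cases hg : 0 ≤ rr ∧ rr < PySem.List.len (srt nums)
      · rw [if_pos hg, if_pos hg,
          lastState_get nums (m : Int) rr hg.1 (by simpa using hg.2)]
        cases lastOcc nums rr (m : Int) <;> simp
      · rw [if_neg hg, if_neg hg]
    rw [foldl_singleton, Prod.mk.injEq]
    refine ⟨?_, lastState_set nums m (by omega)⟩
    rw [hstep]
    simp only [List.flatMap_cons, List.flatMap_nil, List.append_nil]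

lemma solve_alt_eq_foldl (nums : List Int) :
    solve_alt nums = (Sc nums).foldl min (10 ^ 20) := by
  have hranks : nums.map (fun v =>
      ((PySem.List.enumerate (srt nums)).foldl
        (fun d p => d.insert p.2 p.1) PySem.Dict.empty).getD v 0)
      = nums.map (rk nums) :=
    List.map_congr_left (fun v hv => rankD_getD nums v hv)
  show ((PySem.List.enumerate (nums.map (fun v =>
      ((PySem.List.enumerate (PySem.List.sorted (PySem.Set.ofList nums) (fun x => x) false)).foldl
        (fun d p => d.insert p.2 p.1) PySem.Dict.empty).getD v 0))).foldl
      (fun (st : Int × List (Option Int)) jr =>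
        (([jr.2 - 1, jr.2, jr.2 + 1] : List Int).foldl
            (fun res rr =>
              if 0 ≤ rr ∧ rr < PySem.List.len (PySem.List.sorted (PySem.Set.ofList nums) (fun x => x) false) then
                match PySem.List.pyGetD st.2 rr none with
                | some m => min res (jr.1 - m)
                | none => res
              else res)
            st.1,
         PySem.List.pySetD st.2 jr.2 (some jr.1)))
      ((10 : Int) ^ 20,
        List.replicate (PySem.List.sorted (PySem.Set.ofList nums) (fun x => x) false).length
          (none : Option Int))).1
    = (Sc nums).foldl min (10 ^ 20)
  have hsrt : PySem.List.sorted (PySem.Set.ofList nums) (fun x => x) false = srt nums := rfl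
  rw [hsrt, hranks, PySem.List.enumerate_eq_map_pyRange (nums.map (rk nums)) 0, List.foldl_map,
    lastState_zero]
  have hlen : PySem.List.len (nums.map (rk nums)) = ((nums.length : Nat) : Int) := by
    simp [PySem.List.len_eq]
  rw [hlen, sweep nums nums.length le_rfl]
  simp [Sc, PySem.List.len_eq]

lemma dom_Sc_Bc (nums : List Int) : ∀ c ∈ Sc nums, ∃ c' ∈ Bc nums, c' ≤ c := by
  intro c hc
  rcases List.mem_flatMap.mp hc with ⟨j, hj, hg⟩
  rcases PySem.List.mem_pyRange_one.mp hj with ⟨hj0, hjn⟩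
  rw [PySem.List.len_eq] at hjn
  rcases List.mem_filterMap.mp hg with ⟨rr, hrr, hsome⟩
  by_cases hguard : 0 ≤ rr ∧ rr < PySem.List.len (srt nums)
  swap
  · rw [if_neg hguard] at hsome; exact absurd hsome (by simp)
  rw [if_pos hguard] at hsome
  rcases Option.map_eq_some_iff.mp hsome with ⟨m, hlast, rfl⟩
  rcases lastOcc_some nums rr j m hlast with ⟨⟨hm0, hmj, hmr⟩, _⟩
  set q := j.toNat with hqdef
  set p := m.toNat with hpdef
  have hq : q < nums.length := by omega
  have hp : p < nums.length := by omega
  have hrkp : rk nums nums[p] = rr := by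
    rw [← ranksL_at nums p hp]
    rw [show ((p : Nat) : Int) = m by omega]
    exact hmr
  have hrkq : rk nums nums[q] = PySem.List.pyGetD (nums.map (rk nums)) j 0 := by
    rw [← ranksL_at nums q hq]
    congr 1
    omega
  have hrrmem : rr = PySem.List.pyGetD (nums.map (rk nums)) j 0 - 1 ∨
      rr = PySem.List.pyGetD (nums.map (rk nums)) j 0 ∨
      rr = PySem.List.pyGetD (nums.map (rk nums)) j 0 + 1 := by
    simpa using hrr
  refine ⟨j - m, ?_, le_rfl⟩
  apply (mem_Bc_iff nums _).mpr
  refine ⟨p, q, hp, hq, by omega, ?_, by omega⟩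
  rw [hrkp, hrkq]
  rcases hrrmem with h | h | h <;> rw [h] <;> simp
lemma dom_Bc_Sc (nums : List Int) : ∀ c ∈ Bc nums, ∃ c' ∈ Sc nums, c' ≤ c := by
  intro c hc
  rcases (mem_Bc_iff nums c).mp hc with ⟨p, q, hp, hq, hpq, hcond, rfl⟩
  have hRq := ranksL_at nums q hq
  have hRp := ranksL_at nums p hp
  have hb := rk_bounds nums nums[p] (List.getElem_mem hp)
  rcases lastOcc_exists nums (rk nums nums[p]) (q : Int) (p : Int) (by positivity)
    (by exact_mod_cast hpq) hRp with ⟨m, hm, hpm⟩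
  refine ⟨(q : Int) - m, ?_, by omega⟩
  unfold Sc
  apply List.mem_flatMap.mpr
  refine ⟨(q : Int), PySem.List.mem_pyRange_one.mpr
    ⟨by positivity, by rw [PySem.List.len_eq]; exact_mod_cast hq⟩, ?_⟩
  unfold gS
  apply List.mem_filterMap.mpr
  refine ⟨rk nums nums[p], ?_, ?_⟩
  · have := abs_le.mp hcond
    rw [hRq]
    simp only [List.mem_cons, List.not_mem_nil, or_false]
    omega
  · rw [if_pos ⟨hb.1, hb.2⟩, hm]
    rfl

-- ===== VERDICT (by name: the statement is the Claim_ definition above) =====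
theorem solve_spec : Claim_equal_solve := by
  intro nums _
  unfold Spec_solve
  rw [solve_eq_foldl, solve_alt_eq_foldl,
    foldl_min_eq_of_dom ((10:Int)^20) _ _ (dom_A_B nums) (dom_B_A nums),
    foldl_min_eq_of_dom ((10:Int)^20) _ _ (dom_Bc_Sc nums) (dom_Sc_Bc nums)]
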